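-- pv_equiv track=rewrite | github.com/Qtarox/TRAIL_ESTIMATOR | CODE/SKINNY_64-192/Preprocess/CHAR2DIC.py | yddt_list
-- ===== SOURCE A (Python) =====
-- Sbox=[ 12 , 6 , 9 , 0 , 1 , 10 , 2 , 11 , 3 , 8 , 5 , 13 , 4 , 14 , 7 , 15 ]
--
-- def yddt_list(input,output):
--     res=[]
--     for x in range(16):
--         x1=x
--         x2=x^input
--         y1=Sbox[x1]
--         y2=Sbox[x2]
--         if(y1^y2==output and input!=0):
--             res.append(y1)
--     return res
-- ===== SOURCE B (Python) =====
-- Sbox=[ 12 , 6 , 9 , 0 , 1 , 10 , 2 , 11 , 3 , 8 , 5 , 13 , 4 , 14 , 7 , 15 ]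
--
-- def yddt_list(input, output):
--     # DDT row via the involution x <-> x ^ m: test each unordered pair once,
--     # emit both hits tagged with their index, and restore index order by sorting.
--     if input == 0:
--         return []
--     m = input % 16
--     hits = []
--     for x in range(16):
--         p = x ^ m
--         if x < p and Sbox[x] ^ Sbox[p] == output:
--             hits.append((x, Sbox[x]))
--             hits.append((p, Sbox[p]))
--     hits.sort()
--     return [y for _, y in hits]
-- ===== Notes on version B (the rewrite author's own statement) =====
-- stated objective: alternative
-- what changed: B exploits the xor-involution symmetry of the DDT: it reduces the input difference mod 16, tests each unordered pair {x, x^m} once (8 tests instead of 16), emits both members as (index, Sbox value) hits, and restores A's index order by sorting, instead of A's per-x branch-and-collect.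
-- intended difference: For input=-16 with output=0 (inside Pre_), Python's negative-index wraparound makes every x pair with itself so A returns the whole Sbox image [12,6,9,0,1,10,2,11,3,8,5,13,4,14,7,15]; B treats the reduced nibble difference 0 like A treats input=0 and returns [], the intended DDT value for a zero input difference. — e.g. on yddt_list(-16, 0): A returns [12, 6, 9, 0, 1, 10, 2, 11, 3, 8, 5, 13, 4, 14, 7, 15], B returns []
import Mathlib
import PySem

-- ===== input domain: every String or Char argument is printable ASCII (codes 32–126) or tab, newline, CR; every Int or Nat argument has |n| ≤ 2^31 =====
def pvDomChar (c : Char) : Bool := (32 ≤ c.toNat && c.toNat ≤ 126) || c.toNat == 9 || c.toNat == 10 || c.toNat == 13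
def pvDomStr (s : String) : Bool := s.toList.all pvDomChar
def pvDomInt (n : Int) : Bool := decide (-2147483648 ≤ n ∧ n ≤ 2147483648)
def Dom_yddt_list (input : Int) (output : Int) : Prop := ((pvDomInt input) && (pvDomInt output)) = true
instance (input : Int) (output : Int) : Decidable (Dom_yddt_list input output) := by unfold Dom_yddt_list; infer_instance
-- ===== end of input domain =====

-- B tests each xor-involution pair {x, x^(input%16)} once, emits both index-tagged hits and
-- restores index order by sorting (alternative decomposition, same cost); A = B everywhere on
-- Pre_ except the single corner (-16, 0) stated in D_ below, where A's negative-index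
-- wraparound is accidental.


def pvSbox : List Int := [12, 6, 9, 0, 1, 10, 2, 11, 3, 8, 5, 13, 4, 14, 7, 15]

-- ===== PORT A =====
def yddt_list (input : Int) (output : Int) : List Int :=
  (PySem.List.pyRange 0 16 1).foldl (fun res x =>
    let x1 := x
    let x2 := PySem.Int.bxor x input
    let y1 := PySem.List.pyGetD pvSbox x1 0
    let y2 := PySem.List.pyGetD pvSbox x2 0
    if PySem.Int.bxor y1 y2 = output ∧ input ≠ 0 then res ++ [y1] else res) []

-- ===== PORT B =====
def yddt_list_alt (input : Int) (output : Int) : List Int :=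
  if input = 0 then []
  else
    let m := PySem.Int.mod input 16
    let hits := (PySem.List.pyRange 0 16 1).foldl (fun hits x =>
      let p := PySem.Int.bxor x m
      if x < p ∧ PySem.Int.bxor (PySem.List.pyGetD pvSbox x 0) (PySem.List.pyGetD pvSbox p 0) = output
      then hits ++ [(x, PySem.List.pyGetD pvSbox x 0), (p, PySem.List.pyGetD pvSbox p 0)]
      else hits) ([] : List (Int × Int))
    (PySem.List.sorted2 hits Prod.fst Prod.snd).map Prod.snd

-- ===== PRECONDITION & SPEC =====
-- Pre_ excludes exactly the inputs where Python A raises IndexError: for input ≥ 16 or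
-- input ≤ -17 some x ^ input falls outside [-16, 16) and Sbox[x ^ input] raises.
def Pre_yddt_list (input : Int) (output : Int) : Prop := -16 ≤ input ∧ input < 16
instance (input : Int) (output : Int) : Decidable (Pre_yddt_list input output) := by unfold Pre_yddt_list; infer_instance
def pvWitness_yddt_list : Int × Int := (3, 5)

-- At input = -16 with output = 0, Python's negative-index wraparound makes every x pair with
-- itself, so A accidentally returns the whole Sbox image [12,6,9,0,1,10,2,11,3,8,5,13,4,14,7,15];
-- B treats the reduced nibble difference 0 like A itself treats input = 0 and returns [], the
-- intended DDT value for a zero input difference.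
def D_yddt_list (input : Int) (output : Int) : Prop := input = -16 ∧ output = 0
instance (input : Int) (output : Int) : Decidable (D_yddt_list input output) := by unfold D_yddt_list; infer_instance

def Spec_yddt_list (input : Int) (output : Int) (out : List Int) : Prop := ¬ D_yddt_list input output → out = yddt_list_alt input output
instance (input : Int) (output : Int) (out : List Int) : Decidable (Spec_yddt_list input output out) := by unfold Spec_yddt_list; infer_instance

def pvDiffWitness_yddt_list : Int × Int := (-16, 0)
def pvDiffWitnessOut_yddt_list : (List Int) × (List Int) :=
  ([12, 6, 9, 0, 1, 10, 2, 11, 3, 8, 5, 13, 4, 14, 7, 15], [])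

-- ===== CLAIM (what is proved, stated in full; the proofs are below) =====
def Claim_unchanged_yddt_list : Prop := ∀ (input : Int) (output : Int), Dom_yddt_list input output → Pre_yddt_list input output → Spec_yddt_list input output (yddt_list input output)
def Claim_changed_yddt_list : Prop := Dom_yddt_list (pvDiffWitness_yddt_list.1) (pvDiffWitness_yddt_list.2) ∧ Pre_yddt_list (pvDiffWitness_yddt_list.1) (pvDiffWitness_yddt_list.2) ∧ D_yddt_list (pvDiffWitness_yddt_list.1) (pvDiffWitness_yddt_list.2) ∧ yddt_list (pvDiffWitness_yddt_list.1) (pvDiffWitness_yddt_list.2) = pvDiffWitnessOut_yddt_list.1 ∧ yddt_list_alt (pvDiffWitness_yddt_list.1) (pvDiffWitness_yddt_list.2) = pvDiffWitnessOut_yddt_list.2 ∧ pvDiffWitnessOut_yddt_list.1 ≠ pvDiffWitnessOut_yddt_list.2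
def Claim_exact_yddt_list : Prop := ∀ (input : Int) (output : Int), Dom_yddt_list input output → Pre_yddt_list input output → D_yddt_list input output → yddt_list input output ≠ yddt_list_alt input output

-- ===== LEMMAS AND PROOFS =====

theorem sbox_bounds (i : Int) : 0 ≤ PySem.List.pyGetD pvSbox i 0 ∧ PySem.List.pyGetD pvSbox i 0 < 16 := by
  by_cases h : -16 ≤ i ∧ i < 16
  · obtain ⟨h1, h2⟩ := h; interval_cases i <;> decide
  · have hn : PySem.List.pyGet? pvSbox i = none := by
      simp only [PySem.List.pyGet?, PySem.List.pyIdx?, pvSbox]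
      split <;> simp_all <;> omega
    simp [PySem.List.pyGetD, hn]

theorem bxor_bounds (a b : Int) (ha : 0 ≤ a ∧ a < 16) (hb : 0 ≤ b ∧ b < 16) :
    0 ≤ PySem.Int.bxor a b ∧ PySem.Int.bxor a b < 16 := by
  rw [PySem.Int.bxor_of_nonneg ha.1 hb.1]
  have : a.toNat ^^^ b.toNat < 16 := by
    have := Nat.xor_lt_two_pow (show a.toNat < 2^4 by omega) (show b.toNat < 2^4 by omega)
    simpa using this
  omega

-- A returns [] when input = 0 (its guard) or when output is outside the nibble range [0,16).
theorem yddt_A_empty (input output : Int) (h : input = 0 ∨ ¬(0 ≤ output ∧ output < 16)) :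
    yddt_list input output = [] := by
  unfold yddt_list
  rw [PySem.List.foldl_congr_mem (g := fun res _ => res)]
  · exact PySem.List.foldl_ignore _ _
  · intro acc x _
    simp only
    rw [if_neg]
    rintro ⟨hc, hne⟩
    rcases h with h | h
    · exact hne h
    · exact h (hc ▸ bxor_bounds _ _ (sbox_bounds _) (sbox_bounds _))

-- B returns [] when output is outside the nibble range [0,16): no pair can hit it.
theorem yddt_B_empty (input output : Int) (h0 : input ≠ 0) (h : ¬(0 ≤ output ∧ output < 16)) :
    yddt_list_alt input output = [] := by
  unfold yddt_list_alt
  rw [if_neg h0]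
  simp only
  rw [PySem.List.foldl_congr_mem (g := fun hits _ => hits)]
  · rw [PySem.List.foldl_ignore _ _]
    decide
  · intro acc x _
    rw [if_neg]
    rintro ⟨_, hc⟩
    exact h (hc ▸ bxor_bounds _ _ (sbox_bounds _) (sbox_bounds _))

-- For a nibble-range output and any in-bounds input outside the corner (-16, 0), A = B.
theorem yddt_inrange (input output : Int) (hi1 : -16 ≤ input) (hi2 : input < 16)
    (ho1 : 0 ≤ output) (ho2 : output < 16) (hD : ¬(input = -16 ∧ output = 0)) :
    yddt_list input output = yddt_list_alt input output := by
  interval_cases input <;> interval_cases output <;>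
    first
      | exact absurd ⟨rfl, rfl⟩ hD
      | decide

-- ===== VERDICT (by name: the statements are the Claim_ definitions above) =====
theorem yddt_list_spec : Claim_unchanged_yddt_list := by
  intro input output _ hpre
  unfold Spec_yddt_list D_yddt_list
  intro hD
  by_cases h0 : input = 0
  · rw [yddt_A_empty _ _ (Or.inl h0)]
    subst h0
    rfl
  · by_cases ho : 0 ≤ output ∧ output < 16
    · exact yddt_inrange _ _ hpre.1 hpre.2 ho.1 ho.2 hD
    · rw [yddt_A_empty _ _ (Or.inr ho), yddt_B_empty _ _ h0 ho]

theorem yddt_list_changed : Claim_changed_yddt_list := by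
  unfold Claim_changed_yddt_list; decide

theorem yddt_list_tight : Claim_exact_yddt_list := by
  intro input output _ _ hD
  obtain ⟨h1, h2⟩ := hD
  subst h1; subst h2
  decide
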